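-- pv_equiv track=rewrite | github.com/AbleBird/Trip_Record_App-Flet_version | components/table_logic.py | get_middle_group
-- ===== SOURCE A (Python) =====
-- def get_middle_group(rows, idx):
--     n = len(rows)
--
--     if rows[idx].get("type") != 2:
--         return None
--
--     start = idx
--     while start > 0 and rows[start - 1].get("type") == 2:
--         start -= 1
--
--     end = idx
--     while end < n - 1 and rows[end + 1].get("type") == 2:
--         end += 1
--
--     return (start, end)
-- ===== SOURCE B (Python) =====
-- def get_middle_group(rows, idx):
--     # Same guard as the original: raises IndexError on out-of-range idx,
--     # returns None when the clicked row is not of type 2.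
--     if rows[idx].get("type") != 2:
--         return None
--     n = len(rows)
--     # One forward pass: collect every maximal run of consecutive type-2 rows.
--     runs = []
--     open_start = None
--     for i, r in enumerate(rows):
--         if r.get("type") == 2:
--             if open_start is None:
--                 open_start = i
--         else:
--             if open_start is not None:
--                 runs.append((open_start, i - 1))
--                 open_start = None
--     if open_start is not None:
--         runs.append((open_start, n - 1))
--     # Normalise idx to a non-negative position and return its run.
--     j = idx % n
--     for s, e in runs:
--         if s <= j <= e:
--             return (s, e)
--     return None
-- ===== Notes on version B (the rewrite author's own statement) =====
-- stated objective: alternative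
-- what changed: A expands bidirectionally around idx with two while-loops; B makes one forward pass that collects all maximal runs of type-2 rows and returns the run containing the (normalised, non-negative) position of idx.
-- intended difference: For negative in-range idx pointing at a type-2 row, A returns a pair mixing the negative index with positive bounds (e.g. (-1, 0)), an artefact of seeding its loops with idx itself; B returns the intended absolute non-negative boundaries of that run (e.g. (0, 0)). — e.g. on get_middle_group([[("type", 2)]], -1): A returns some (-1, 0), B returns some (0, 0)
import Mathlib
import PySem

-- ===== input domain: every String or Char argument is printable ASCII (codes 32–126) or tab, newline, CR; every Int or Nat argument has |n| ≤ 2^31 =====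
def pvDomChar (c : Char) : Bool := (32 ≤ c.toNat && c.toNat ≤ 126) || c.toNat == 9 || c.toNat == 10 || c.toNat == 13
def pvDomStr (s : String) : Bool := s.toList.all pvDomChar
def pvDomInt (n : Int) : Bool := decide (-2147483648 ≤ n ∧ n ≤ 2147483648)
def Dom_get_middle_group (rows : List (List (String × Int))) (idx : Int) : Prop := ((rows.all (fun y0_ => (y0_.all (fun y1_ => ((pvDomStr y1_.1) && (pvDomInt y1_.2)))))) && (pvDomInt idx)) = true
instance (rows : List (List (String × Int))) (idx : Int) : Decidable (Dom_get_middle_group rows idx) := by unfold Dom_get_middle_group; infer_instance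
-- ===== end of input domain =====

-- B replaces A's two expansion while-loops by a single forward pass that collects all
-- maximal runs of type-2 rows and returns the run containing idx's (normalised) position.

-- ===== PORT A =====
-- rows[i].get("type") == 2, shared by both ports (both Pythons use this test verbatim)
def pvRowIs2 (row : List (String × Int)) : Bool := (PySem.Dict.mk row).get? "type" == some (2 : Int)

-- while start > 0 and rows[start - 1].get("type") == 2: start -= 1
-- (fuel bounds the iterations; called with fuel = idx.toNat, enough since start decreases from idx and stops at 0)
def pvBack (rows : List (List (String × Int))) : Nat → Int → Int
  | 0, start => start
  | fuel + 1, start =>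
    if decide (start > 0) && ((PySem.List.pyGet? rows (start - 1)).map pvRowIs2).getD false
    then pvBack rows fuel (start - 1) else start

-- while end < n - 1 and rows[end + 1].get("type") == 2: end += 1
-- (fuel = 2 * len(rows) bounds the iterations even for negative end)
def pvFwd (rows : List (List (String × Int))) (n : Int) : Nat → Int → Int
  | 0, e => e
  | fuel + 1, e =>
    if decide (e < n - 1) && ((PySem.List.pyGet? rows (e + 1)).map pvRowIs2).getD false
    then pvFwd rows n fuel (e + 1) else e

def get_middle_group (rows : List (List (String × Int))) (idx : Int) : Option (Int × Int) :=
  let n : Int := (rows.length : Int)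
  match PySem.List.pyGet? rows idx with
  | none => none   -- rows[idx] raises IndexError here; excluded by Pre_
  | some row =>
    if pvRowIs2 row = false then none
    else
      let start := pvBack rows idx.toNat idx
      let e := pvFwd rows n (2 * rows.length) idx
      some (start, e)

-- ===== PORT B =====
-- loop body of B's single forward pass (state: completed runs, start of the open run)
def pvStep (acc : List (Int × Int) × Option Int) (p : Int × List (String × Int)) :
    List (Int × Int) × Option Int :=
  if pvRowIs2 p.2 then
    match acc.2 with
    | none => (acc.1, some p.1)
    | some s => (acc.1, some s)
  else
    match acc.2 with
    | none => acc
    | some s => (acc.1 ++ [(s, p.1 - 1)], none)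

def get_middle_group_alt (rows : List (List (String × Int))) (idx : Int) : Option (Int × Int) :=
  match PySem.List.pyGet? rows idx with
  | none => none   -- same guard as A: IndexError; excluded by Pre_
  | some row =>
    if pvRowIs2 row = false then none
    else
      let n : Int := (rows.length : Int)
      let st := (PySem.List.enumerate rows).foldl pvStep ([], none)
      let runs := match st.2 with
        | none => st.1
        | some s => st.1 ++ [(s, n - 1)]
      let j := PySem.Int.mod idx n
      runs.find? (fun se => decide (se.1 ≤ j ∧ j ≤ se.2))

-- ===== PRECONDITION & SPEC =====
-- Pre_ excludes exactly the inputs where rows[idx] raises IndexError (idx out of range).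
def Pre_get_middle_group (rows : List (List (String × Int))) (idx : Int) : Prop :=
  PySem.Raise.InRange rows.length idx
instance (rows : List (List (String × Int))) (idx : Int) : Decidable (Pre_get_middle_group rows idx) := by
  unfold Pre_get_middle_group; infer_instance
def pvWitness_get_middle_group : (List (List (String × Int))) × Int := ([[("type", 2)]], 0)

-- For negative in-range idx pointing at a type-2 row, A returns a pair mixing the negative
-- index with positive bounds (e.g. (-1, 0)), an artefact of seeding its loops with idx itself;
-- B returns the intended absolute non-negative boundaries of that run (e.g. (0, 0)).
def D_get_middle_group (rows : List (List (String × Int))) (idx : Int) : Prop :=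
  idx < 0 ∧ ((PySem.List.pyGet? rows idx).map pvRowIs2).getD false = true
instance (rows : List (List (String × Int))) (idx : Int) : Decidable (D_get_middle_group rows idx) := by
  unfold D_get_middle_group; infer_instance

def Spec_get_middle_group (rows : List (List (String × Int))) (idx : Int) (out : Option (Int × Int)) : Prop :=
  ¬ D_get_middle_group rows idx → out = get_middle_group_alt rows idx
instance (rows : List (List (String × Int))) (idx : Int) (out : Option (Int × Int)) : Decidable (Spec_get_middle_group rows idx out) := by
  unfold Spec_get_middle_group; infer_instance

def pvDiffWitness_get_middle_group : (List (List (String × Int))) × Int := ([[("type", 2)]], -1)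
def pvDiffWitnessOut_get_middle_group : (Option (Int × Int)) × (Option (Int × Int)) :=
  (some (-1, 0), some (0, 0))

-- ===== CLAIM (what is proved, stated in full; the proofs are below) =====
def Claim_unchanged_get_middle_group : Prop := ∀ (rows : List (List (String × Int))) (idx : Int), Dom_get_middle_group rows idx → Pre_get_middle_group rows idx → Spec_get_middle_group rows idx (get_middle_group rows idx)
def Claim_changed_get_middle_group : Prop := Dom_get_middle_group (pvDiffWitness_get_middle_group.1) (pvDiffWitness_get_middle_group.2) ∧ Pre_get_middle_group (pvDiffWitness_get_middle_group.1) (pvDiffWitness_get_middle_group.2) ∧ D_get_middle_group (pvDiffWitness_get_middle_group.1) (pvDiffWitness_get_middle_group.2) ∧ get_middle_group (pvDiffWitness_get_middle_group.1) (pvDiffWitness_get_middle_group.2) = pvDiffWitnessOut_get_middle_group.1 ∧ get_middle_group_alt (pvDiffWitness_get_middle_group.1) (pvDiffWitness_get_middle_group.2) = pvDiffWitnessOut_get_middle_group.2 ∧ pvDiffWitnessOut_get_middle_group.1 ≠ pvDiffWitnessOut_get_middle_group.2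
def Claim_exact_get_middle_group : Prop := ∀ (rows : List (List (String × Int))) (idx : Int), Dom_get_middle_group rows idx → Pre_get_middle_group rows idx → D_get_middle_group rows idx → get_middle_group rows idx ≠ get_middle_group_alt rows idx

-- ===== LEMMAS AND PROOFS =====

-- the type-2 flag of row x (false out of range, like Python's run boundaries)
def pvFlag (rows : List (List (String × Int))) (x : Nat) : Bool := pvRowIs2 (rows.getD x [])

lemma pvFlag_out (rows : List (List (String × Int))) (k : Nat) (h : rows.length ≤ k) :
    pvFlag rows k = false := by
  unfold pvFlag
  rw [List.getD_eq_default _ _ h]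
  decide

lemma pvFlagInt (rows : List (List (String × Int))) (k : Nat) :
    ((PySem.List.pyGet? rows (k : Int)).map pvRowIs2).getD false = pvFlag rows k := by
  rw [PySem.List.pyGet?_natCast]
  unfold pvFlag
  rw [List.getD_eq_getElem?_getD]
  cases h : rows[k]? with
  | none => simp; decide
  | some r => simp

-- (s, e) is a maximal run of type-2 rows
def pvMaxRun (rows : List (List (String × Int))) (s e : Nat) : Prop :=
  s ≤ e ∧ e < rows.length ∧ (∀ x, s ≤ x → x ≤ e → pvFlag rows x = true) ∧
  (s = 0 ∨ pvFlag rows (s - 1) = false) ∧ pvFlag rows (e + 1) = false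

def pvClosed (rows : List (List (String × Int))) (p : Int × Int) : Prop :=
  ∃ s e : Nat, p = ((s : Int), (e : Int)) ∧ pvMaxRun rows s e

-- invariant of B's fold after the first m rows
def pvInv (rows : List (List (String × Int))) (m : Nat) (st : List (Int × Int) × Option Int) : Prop :=
  (∀ p ∈ st.1, pvClosed rows p) ∧
  (∀ s, st.2 = some s → ∃ sn : Nat, s = (sn : Int) ∧ sn < m ∧
      (∀ x, sn ≤ x → x < m → pvFlag rows x = true) ∧ (sn = 0 ∨ pvFlag rows (sn - 1) = false)) ∧
  (st.2 = none → m = 0 ∨ pvFlag rows (m - 1) = false) ∧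
  (∀ x : Nat, x < m → pvFlag rows x = true →
      (∃ p ∈ st.1, p.1 ≤ (x : Int) ∧ (x : Int) ≤ p.2) ∨ (∃ s, st.2 = some s ∧ s ≤ (x : Int)))

lemma pvStep_inv (rows : List (List (String × Int))) (m : Nat) (st : List (Int × Int) × Option Int)
    (r : List (String × Int)) (hr : rows[m]? = some r) (h : pvInv rows m st) :
    pvInv rows (m + 1) (pvStep st ((m : Int), r)) := by
  obtain ⟨runs, op⟩ := st
  obtain ⟨hclosed, hopen, hnone, hcov⟩ := h
  have hm : m < rows.length := by
    by_contra hge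
    rw [List.getElem?_eq_none (by omega)] at hr
    cases hr
  have hflag : pvFlag rows m = pvRowIs2 r := by
    unfold pvFlag
    rw [List.getD_eq_getElem?_getD, hr]
    rfl
  by_cases hb : pvRowIs2 r = true
  · cases op with
    | none =>
      have hstep : pvStep (runs, none) ((m : Int), r) = (runs, some (m : Int)) := by
        simp [pvStep, hb]
      rw [hstep]
      refine ⟨hclosed, ?_, by simp, ?_⟩
      · intro s hs
        simp only [Option.some.injEq] at hs
        subst hs
        refine ⟨m, rfl, by omega, ?_, hnone rfl⟩
        intro x h1 h2
        have : x = m := by omega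
        subst this
        rw [hflag]; exact hb
      · intro x hx hfx
        rcases Nat.lt_or_ge x m with hxm | hxm
        · rcases hcov x hxm hfx with ⟨p, hp, hp1, hp2⟩ | ⟨s, hs, _⟩
          · exact Or.inl ⟨p, hp, hp1, hp2⟩
          · cases hs
        · have : x = m := by omega
          subst this
          exact Or.inr ⟨_, rfl, le_rfl⟩
    | some s =>
      obtain ⟨sn, rfl, hsn, hall, hbd⟩ := hopen s rfl
      have hstep : pvStep (runs, some ((sn : Int))) ((m : Int), r) =
          (runs, some ((sn : Nat) : Int)) := by
        simp [pvStep, hb]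
      rw [hstep]
      refine ⟨hclosed, ?_, by simp, ?_⟩
      · intro s' hs'
        simp only [Option.some.injEq] at hs'
        subst hs'
        refine ⟨sn, rfl, by omega, ?_, hbd⟩
        intro x h1 h2
        rcases Nat.lt_or_ge x m with hxm | hxm
        · exact hall x h1 hxm
        · have : x = m := by omega
          subst this
          rw [hflag]; exact hb
      · intro x hx hfx
        rcases Nat.lt_or_ge x m with hxm | hxm
        · rcases hcov x hxm hfx with ⟨p, hp, hp1, hp2⟩ | ⟨s', hs', hle⟩
          · exact Or.inl ⟨p, hp, hp1, hp2⟩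
          · simp only [Option.some.injEq] at hs'
            subst hs'
            exact Or.inr ⟨_, rfl, hle⟩
        · have : x = m := by omega
          subst this
          exact Or.inr ⟨_, rfl, by exact_mod_cast Nat.le_of_lt hsn⟩
  · have hb' : pvRowIs2 r = false := by revert hb; cases pvRowIs2 r <;> simp
    have hfm : pvFlag rows m = false := by rw [hflag]; exact hb'
    cases op with
    | none =>
      have hstep : pvStep (runs, none) ((m : Int), r) = (runs, none) := by
        simp [pvStep, hb']
      rw [hstep]
      refine ⟨hclosed, by simp, fun _ => Or.inr (by simpa using hfm), ?_⟩
      intro x hx hfx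
      rcases Nat.lt_or_ge x m with hxm | hxm
      · rcases hcov x hxm hfx with ⟨p, hp, hp1, hp2⟩ | ⟨s, hs, _⟩
        · exact Or.inl ⟨p, hp, hp1, hp2⟩
        · cases hs
      · have : x = m := by omega
        subst this
        rw [hfm] at hfx; cases hfx
    | some s =>
      obtain ⟨sn, rfl, hsn, hall, hbd⟩ := hopen s rfl
      have hstep : pvStep (runs, some ((sn : Int))) ((m : Int), r) =
          (runs ++ [(((sn : Int)), ((m : Int) - 1))], none) := by
        simp [pvStep, hb']
      rw [hstep]
      have hm1 : ((m : Nat) : Int) - 1 = ((m - 1 : Nat) : Int) := by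
        have h1 : 1 ≤ m := by omega
        push_cast [h1]
        ring
      refine ⟨?_, by simp, fun _ => Or.inr (by simpa using hfm), ?_⟩
      · intro p hp
        rcases List.mem_append.mp hp with hp' | hp'
        · exact hclosed p hp'
        · have hpe : p = (((sn : Int)), ((m : Nat) : Int) - 1) := by simpa using hp'
          subst hpe
          refine ⟨sn, m - 1, by rw [hm1], by omega, by omega, ?_, hbd, ?_⟩
          · intro x h1 h2
            exact hall x h1 (by omega)
          · have he : m - 1 + 1 = m := by omega
            rw [he]; exact hfm
      · intro x hx hfx
        rcases Nat.lt_or_ge x m with hxm | hxm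
        · rcases hcov x hxm hfx with ⟨p, hp, hp1, hp2⟩ | ⟨s', hs', hle⟩
          · exact Or.inl ⟨p, List.mem_append_left _ hp, hp1, hp2⟩
          · simp only [Option.some.injEq] at hs'
            subst hs'
            refine Or.inl ⟨(((sn : Int)), ((m : Int) - 1)),
              List.mem_append_right _ (List.mem_singleton_self _), hle, ?_⟩
            show (x : Int) ≤ ((m : Nat) : Int) - 1
            omega
        · have : x = m := by omega
          subst this
          rw [hfm] at hfx; cases hfx

lemma pvFoldInv (rows : List (List (String × Int))) :
    ∀ (l : List (List (String × Int))) (m : Nat) (st : List (Int × Int) × Option Int),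
      rows.drop m = l → m ≤ rows.length → pvInv rows m st →
      pvInv rows rows.length ((PySem.List.enumerate l (m : Int)).foldl pvStep st) := by
  intro l
  induction l with
  | nil =>
    intro m st hdrop hmle hinv
    have hlen : rows.length - m = 0 := by
      have := congrArg List.length hdrop
      simpa using this
    have hme : m = rows.length := by omega
    subst hme
    simpa [PySem.List.enumerate] using hinv
  | cons r t ih =>
    intro m st hdrop hmle hinv
    have hr : rows[m]? = some r := by
      have h0 : (rows.drop m)[0]? = rows[m]? := by
        rw [List.getElem?_drop]
        simp
      rw [hdrop] at h0
      simpa using h0.symm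
    have hm : m < rows.length := by
      by_contra hge
      rw [List.getElem?_eq_none (by omega)] at hr
      cases hr
    have ht : rows.drop (m + 1) = t := by
      have h1 := congrArg (List.drop 1) hdrop
      rw [List.drop_drop] at h1
      simpa using h1
    rw [PySem.List.enumerate_cons, List.foldl_cons]
    have hc1 : (m : Int) + 1 = ((m + 1 : Nat) : Int) := by push_cast; ring
    rw [hc1]
    exact ih (m + 1) _ ht (by omega) (pvStep_inv rows m st r hr hinv)

def pvRunsOf (rows : List (List (String × Int))) : List (Int × Int) :=
  match ((PySem.List.enumerate rows).foldl pvStep ([], none)).2 with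
  | none => ((PySem.List.enumerate rows).foldl pvStep ([], none)).1
  | some s => ((PySem.List.enumerate rows).foldl pvStep ([], none)).1 ++
      [(s, (rows.length : Int) - 1)]

lemma pvRunsOf_spec (rows : List (List (String × Int))) :
    (∀ p ∈ pvRunsOf rows, pvClosed rows p) ∧
    (∀ x : Nat, x < rows.length → pvFlag rows x = true →
      ∃ p ∈ pvRunsOf rows, p.1 ≤ (x : Int) ∧ (x : Int) ≤ p.2) := by
  have hinv0 : pvInv rows 0 ([], none) := by
    refine ⟨by simp, by simp, fun _ => Or.inl rfl, ?_⟩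
    intro x hx
    omega
  have h := pvFoldInv rows rows 0 ([], none) (by simp) (by omega) hinv0
  rw [Nat.cast_zero] at h
  obtain ⟨hcl, hop, hnn, hcv⟩ := h
  unfold pvRunsOf
  cases hs : ((PySem.List.enumerate rows).foldl pvStep ([], none)).2 with
  | none =>
    refine ⟨hcl, ?_⟩
    intro x hx hfx
    rcases hcv x hx hfx with hL | ⟨s, hsome, _⟩
    · exact hL
    · rw [hs] at hsome
      cases hsome
  | some s =>
    obtain ⟨sn, rfl, hsn, hall, hbd⟩ := hop s hs
    have hn1 : (rows.length : Int) - 1 = ((rows.length - 1 : Nat) : Int) := by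
      have h1 : 1 ≤ rows.length := by omega
      push_cast [h1]
      ring
    have hclnew : pvClosed rows ((sn : Int), (rows.length : Int) - 1) := by
      refine ⟨sn, rows.length - 1, by rw [hn1], by omega, by omega, ?_, hbd, ?_⟩
      · intro x h1 h2
        exact hall x h1 (by omega)
      · have he : rows.length - 1 + 1 = rows.length := by omega
        rw [he]
        exact pvFlag_out rows rows.length le_rfl
    constructor
    · intro p hp
      rcases List.mem_append.mp hp with hp' | hp'
      · exact hcl p hp'
      · have hpe : p = ((sn : Int), (rows.length : Int) - 1) := by simpa using hp'
        rw [hpe]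
        exact hclnew
    · intro x hx hfx
      rcases hcv x hx hfx with ⟨p, hp, h1, h2⟩ | ⟨s', hsome, hle⟩
      · exact ⟨p, List.mem_append_left _ hp, h1, h2⟩
      · rw [hs] at hsome
        simp only [Option.some.injEq] at hsome
        subst hsome
        refine ⟨((sn : Int), (rows.length : Int) - 1),
          List.mem_append_right _ (List.mem_singleton_self _), hle, ?_⟩
        show (x : Int) ≤ (rows.length : Int) - 1
        omega

lemma pvA_eq (rows : List (List (String × Int))) (idx : Int) (row : List (String × Int))
    (hrow : PySem.List.pyGet? rows idx = some row) (hb : pvRowIs2 row = true) :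
    get_middle_group rows idx =
      some (pvBack rows idx.toNat idx,
            pvFwd rows (rows.length : Int) (2 * rows.length) idx) := by
  unfold get_middle_group
  rw [hrow]
  simp [hb]

lemma pvAlt_eq (rows : List (List (String × Int))) (idx : Int) (row : List (String × Int))
    (hrow : PySem.List.pyGet? rows idx = some row) (hb : pvRowIs2 row = true) :
    get_middle_group_alt rows idx =
      (pvRunsOf rows).find? (fun se =>
        decide (se.1 ≤ PySem.Int.mod idx (rows.length : Int) ∧
                PySem.Int.mod idx (rows.length : Int) ≤ se.2)) := by
  unfold get_middle_group_alt pvRunsOf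
  rw [hrow]
  simp [hb]

lemma pvBoth_none (rows : List (List (String × Int))) (idx : Int) (row : List (String × Int))
    (hrow : PySem.List.pyGet? rows idx = some row) (hb : pvRowIs2 row = false) :
    get_middle_group rows idx = none ∧ get_middle_group_alt rows idx = none := by
  unfold get_middle_group get_middle_group_alt
  rw [hrow]
  simp [hb]

lemma pvBack_spec (rows : List (List (String × Int))) :
    ∀ (fuel start : Nat), start ≤ fuel →
    ∃ r : Nat, pvBack rows fuel (start : Int) = (r : Int) ∧ r ≤ start ∧
      (∀ x, r ≤ x → x < start → pvFlag rows x = true) ∧ (r = 0 ∨ pvFlag rows (r - 1) = false) := by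
  intro fuel
  induction fuel with
  | zero =>
    intro start hs
    have h0 : start = 0 := by omega
    subst h0
    exact ⟨0, by simp [pvBack], le_rfl, fun x h1 h2 => absurd h2 (by omega), Or.inl rfl⟩
  | succ fuel ih =>
    intro start hs
    match start, hs with
    | 0, _ =>
      exact ⟨0, by simp [pvBack], le_rfl, fun x h1 h2 => absurd h2 (by omega), Or.inl rfl⟩
    | (k + 1), hs =>
      have hcast : ((k + 1 : Nat) : Int) - 1 = ((k : Nat) : Int) := by push_cast; ring
      have hcond : (decide (((k + 1 : Nat) : Int) > 0) &&
          ((PySem.List.pyGet? rows (((k + 1 : Nat) : Int) - 1)).map pvRowIs2).getD false) =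
          pvFlag rows k := by
        rw [hcast, pvFlagInt]
        simp
      by_cases hf : pvFlag rows k = true
      · have hstep : pvBack rows (fuel + 1) ((k + 1 : Nat) : Int) = pvBack rows fuel ((k : Nat) : Int) := by
          rw [pvBack, hcond, hf, if_pos rfl, hcast]
        obtain ⟨r, hr, hrle, hall, hbd⟩ := ih k (by omega)
        refine ⟨r, by rw [hstep, hr], by omega, ?_, hbd⟩
        intro x h1 h2
        rcases Nat.lt_or_ge x k with hx | hx
        · exact hall x h1 hx
        · have : x = k := by omega
          subst this; exact hf
      · have hf' : pvFlag rows k = false := by revert hf; cases pvFlag rows k <;> simp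
        have hstep : pvBack rows (fuel + 1) ((k + 1 : Nat) : Int) = ((k + 1 : Nat) : Int) := by
          rw [pvBack, hcond, hf']
          simp
        exact ⟨k + 1, hstep, le_rfl, fun x h1 h2 => absurd h1 (by omega),
          Or.inr (by simpa using hf')⟩

lemma pvFwd_spec (rows : List (List (String × Int))) :
    ∀ (fuel e : Nat), e < rows.length → rows.length - e ≤ fuel + 1 →
    ∃ r : Nat, pvFwd rows (rows.length : Int) fuel (e : Int) = (r : Int) ∧ e ≤ r ∧
      r < rows.length ∧ (∀ x, e < x → x ≤ r → pvFlag rows x = true) ∧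
      pvFlag rows (r + 1) = false := by
  intro fuel
  induction fuel with
  | zero =>
    intro e he hfe
    have he1 : e = rows.length - 1 := by omega
    refine ⟨e, by simp [pvFwd], le_rfl, he, fun x h1 h2 => absurd h1 (by omega), ?_⟩
    exact pvFlag_out rows (e + 1) (by omega)
  | succ fuel ih =>
    intro e he hfe
    have hcast : ((e : Nat) : Int) + 1 = ((e + 1 : Nat) : Int) := by push_cast; ring
    have hcond : (decide (((e : Nat) : Int) < (rows.length : Int) - 1) &&
        ((PySem.List.pyGet? rows (((e : Nat) : Int) + 1)).map pvRowIs2).getD false) =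
        (decide (e + 1 < rows.length) && pvFlag rows (e + 1)) := by
      rw [hcast, pvFlagInt]
      congr 1
      simp only [decide_eq_decide]
      omega
    by_cases hc : e + 1 < rows.length ∧ pvFlag rows (e + 1) = true
    · have hstep : pvFwd rows (rows.length : Int) (fuel + 1) ((e : Nat) : Int) =
          pvFwd rows (rows.length : Int) fuel ((e + 1 : Nat) : Int) := by
        rw [pvFwd, hcond, decide_eq_true hc.1, hc.2, hcast]
        simp
      obtain ⟨r, hr, hrle, hrlt, hall, hbd⟩ := ih (e + 1) hc.1 (by omega)
      refine ⟨r, by rw [hstep, hr], by omega, hrlt, ?_, hbd⟩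
      intro x h1 h2
      rcases Nat.lt_or_ge e (x - 1) with hx | hx
      · exact hall x (by omega) h2
      · have : x = e + 1 := by omega
        subst this; exact hc.2
    · have hcondf : (decide (e + 1 < rows.length) && pvFlag rows (e + 1)) = false := by
        by_cases hf : pvFlag rows (e + 1) = true
        · have : ¬ (e + 1 < rows.length) := fun hlt => hc ⟨hlt, hf⟩
          simp [this]
        · have hf' : pvFlag rows (e + 1) = false := by
            revert hf; cases pvFlag rows (e + 1) <;> simp
          simp [hf']
      have hstep : pvFwd rows (rows.length : Int) (fuel + 1) ((e : Nat) : Int) = ((e : Nat) : Int) := by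
        rw [pvFwd, hcond, hcondf]
        simp
      refine ⟨e, hstep, le_rfl, he, fun x h1 h2 => absurd h1 (by omega), ?_⟩
      by_cases hf : pvFlag rows (e + 1) = true
      · have : ¬ (e + 1 < rows.length) := fun hlt => hc ⟨hlt, hf⟩
        exact pvFlag_out rows (e + 1) (by omega)
      · revert hf; cases pvFlag rows (e + 1) <;> simp

lemma pvMaxRun_unique (rows : List (List (String × Int))) (s e s' e' j : Nat)
    (h : pvMaxRun rows s e) (h' : pvMaxRun rows s' e')
    (h1 : s ≤ j) (h2 : j ≤ e) (h3 : s' ≤ j) (h4 : j ≤ e') : s = s' ∧ e = e' := by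
  obtain ⟨_, _, hint, hl, hr⟩ := h
  obtain ⟨_, _, hint', hl', hr'⟩ := h'
  constructor
  · rcases Nat.lt_trichotomy s s' with hlt | heq | hgt
    · rcases hl' with h0 | hf
      · omega
      · have := hint (s' - 1) (by omega) (by omega); rw [this] at hf; cases hf
    · exact heq
    · rcases hl with h0 | hf
      · omega
      · have := hint' (s - 1) (by omega) (by omega); rw [this] at hf; cases hf
  · rcases Nat.lt_trichotomy e e' with hlt | heq | hgt
    · have := hint' (e + 1) (by omega) (by omega); rw [this] at hr; cases hr
    · exact heq
    · have := hint (e' + 1) (by omega) (by omega); rw [this] at hr'; cases hr'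

lemma pvFind?_unique {α : Type} (p : α → Bool) :
    ∀ (L : List α) (a : α), a ∈ L → p a = true → (∀ b ∈ L, p b = true → b = a) →
    L.find? p = some a := by
  intro L
  induction L with
  | nil => intro a ha; cases ha
  | cons x t ih =>
    intro a ha hpa huniq
    by_cases hx : p x = true
    · have hxa : x = a := huniq x List.mem_cons_self hx
      subst hxa
      simp [List.find?, hx]
    · simp only [Bool.not_eq_true] at hx
      simp only [List.find?, hx]
      rcases List.mem_cons.mp ha with rfl | ha'
      · rw [hpa] at hx; cases hx
      · exact ih a ha' hpa (fun b hb => huniq b (List.mem_cons_of_mem _ hb))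

-- ===== VERDICT (by name: the statement is the Claim_ definition above) =====
theorem get_middle_group_spec : Claim_unchanged_get_middle_group := by
  unfold Claim_unchanged_get_middle_group
  intro rows idx hDom hPre
  unfold Spec_get_middle_group
  intro hD
  obtain ⟨row, hrow⟩ : ∃ row, PySem.List.pyGet? rows idx = some row := by
    cases h : PySem.List.pyGet? rows idx with
    | none =>
      rw [PySem.List.pyGet?_eq_none_iff] at h
      exact absurd hPre h
    | some row => exact ⟨row, rfl⟩
  by_cases hb : pvRowIs2 row = true
  · have hidx : 0 ≤ idx := by
      by_contra hneg
      have hneg' : idx < 0 := by omega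
      exact hD ⟨hneg', by rw [hrow]; simpa using hb⟩
    obtain ⟨j, rfl⟩ : ∃ j : Nat, idx = (j : Int) := ⟨idx.toNat, (Int.toNat_of_nonneg hidx).symm⟩
    have hjget : rows[j]? = some row := by
      rw [← PySem.List.pyGet?_natCast]
      exact hrow
    have hjlen : j < rows.length := by
      by_contra hge
      rw [List.getElem?_eq_none (by omega)] at hjget
      cases hjget
    have hflagj : pvFlag rows j = true := by
      unfold pvFlag
      rw [List.getD_eq_getElem?_getD, hjget]
      exact hb
    obtain ⟨s0, hs0eq, hs0le, hs0all, hs0bd⟩ := pvBack_spec rows j j le_rfl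
    obtain ⟨e0, he0eq, he0le, he0lt, he0all, he0bd⟩ :=
      pvFwd_spec rows (2 * rows.length) j hjlen (by omega)
    have hintv : ∀ x, s0 ≤ x → x ≤ e0 → pvFlag rows x = true := by
      intro x h1 h2
      rcases Nat.lt_trichotomy x j with hx | hx | hx
      · exact hs0all x h1 hx
      · subst hx; exact hflagj
      · exact he0all x hx h2
    have hmax : pvMaxRun rows s0 e0 := ⟨by omega, he0lt, hintv, hs0bd, he0bd⟩
    have hmod : PySem.Int.mod ((j : Nat) : Int) ((rows.length : Nat) : Int) = ((j : Nat) : Int) := by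
      rw [PySem.Int.mod_natCast]
      norm_cast
      exact Nat.mod_eq_of_lt hjlen
    obtain ⟨hcl, hcv⟩ := pvRunsOf_spec rows
    obtain ⟨p, hp, hp1, hp2⟩ := hcv j hjlen hflagj
    obtain ⟨sb, eb, rfl, hmr⟩ := hcl p hp
    have hsb_le : sb ≤ j := by
      have h' : (sb : Int) ≤ (j : Int) := hp1
      exact_mod_cast h'
    have hj_le : j ≤ eb := by
      have h'' : (j : Int) ≤ (eb : Int) := hp2
      exact_mod_cast h''
    obtain ⟨hse, hee⟩ :=
      pvMaxRun_unique rows sb eb s0 e0 j hmr hmax hsb_le hj_le (by omega) (by omega)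
    have hfind : (pvRunsOf rows).find? (fun se =>
        decide (se.1 ≤ ((j : Nat) : Int) ∧ ((j : Nat) : Int) ≤ se.2)) =
        some ((sb : Int), (eb : Int)) := by
      apply pvFind?_unique
      · exact hp
      · simp only [decide_eq_true_eq]
        exact ⟨hp1, hp2⟩
      · intro b hbmem hbp
        obtain ⟨s', e', rfl, hmr'⟩ := hcl b hbmem
        simp only [decide_eq_true_eq] at hbp
        have h1 : s' ≤ j := by
          have h3 : (s' : Int) ≤ (j : Int) := hbp.1
          exact_mod_cast h3
        have h2 : j ≤ e' := by
          have h4 : (j : Int) ≤ (e' : Int) := hbp.2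
          exact_mod_cast h4
        obtain ⟨hs', he'⟩ := pvMaxRun_unique rows s' e' sb eb j hmr' hmr h1 h2 hsb_le hj_le
        rw [hs', he']
    rw [pvA_eq rows ((j : Nat) : Int) row hrow hb,
        pvAlt_eq rows ((j : Nat) : Int) row hrow hb]
    rw [Int.toNat_natCast, hs0eq, he0eq, hmod, hfind, ← hse, ← hee]
  · have hb' : pvRowIs2 row = false := by revert hb; cases pvRowIs2 row <;> simp
    obtain ⟨hA, hB⟩ := pvBoth_none rows idx row hrow hb'
    rw [hA, hB]

theorem get_middle_group_changed : Claim_changed_get_middle_group := by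
  unfold Claim_changed_get_middle_group; decide

theorem get_middle_group_tight : Claim_exact_get_middle_group := by
  unfold Claim_exact_get_middle_group
  intro rows idx hDom hPre hD
  obtain ⟨hneg, hflag⟩ := hD
  obtain ⟨row, hrow⟩ : ∃ row, PySem.List.pyGet? rows idx = some row := by
    cases h : PySem.List.pyGet? rows idx with
    | none =>
      rw [PySem.List.pyGet?_eq_none_iff] at h
      exact absurd hPre h
    | some row => exact ⟨row, rfl⟩
  have hb : pvRowIs2 row = true := by
    rw [hrow] at hflag
    simpa using hflag
  have hA : get_middle_group rows idx =
      some (idx, pvFwd rows (rows.length : Int) (2 * rows.length) idx) := by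
    rw [pvA_eq rows idx row hrow hb]
    have h0 : idx.toNat = 0 := Int.toNat_of_nonpos (by omega)
    rw [h0]
    rfl
  rw [hA, pvAlt_eq rows idx row hrow hb]
  intro heq
  obtain ⟨hcl, _⟩ := pvRunsOf_spec rows
  cases hfind : (pvRunsOf rows).find? (fun se =>
      decide (se.1 ≤ PySem.Int.mod idx (rows.length : Int) ∧
              PySem.Int.mod idx (rows.length : Int) ≤ se.2)) with
  | none => rw [hfind] at heq; cases heq
  | some p =>
    rw [hfind] at heq
    have hpmem : p ∈ pvRunsOf rows := List.mem_of_find?_eq_some hfind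
    obtain ⟨sb, eb, rfl, _⟩ := hcl p hpmem
    have h1 : idx = ((sb : Nat) : Int) := congrArg Prod.fst (Option.some.inj heq)
    omega
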